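-- pv_equiv track=rewrite | github.com/Lakhani1809/personal_ai_stylist | backend/server.py | get_seasonal_styling_advice
-- ===== SOURCE A (Python) =====
-- def get_seasonal_styling_advice(month: int) -> str:
--     """Seasonal fashion advice based on current month"""
--     seasons = {
--         (12, 1, 2): "Winter: Layer textures like wool, cashmere, and leather. Rich jewel tones and metallics shine now.",
--         (3, 4, 5): "Spring: Fresh pastels and florals bloom. Light layers and transitional pieces work perfectly.",
--         (6, 7, 8): "Summer: Breathable fabrics like linen and cotton. Light colors reflect heat and look fresh.",
--         (9, 10, 11): "Fall: Earth tones and rich textures. Perfect time for layering and cozy knits."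
--     }
--
--     for months, advice in seasons.items():
--         if month in months:
--             return advice
--     return ""
-- ===== SOURCE B (Python) =====
-- def get_seasonal_styling_advice(month: int) -> str:
--     """Seasonal fashion advice based on current month (closed-form lookup)."""
--     if not 1 <= month <= 12:
--         return ""
--     advice = [
--         "Winter: Layer textures like wool, cashmere, and leather. Rich jewel tones and metallics shine now.",
--         "Spring: Fresh pastels and florals bloom. Light layers and transitional pieces work perfectly.",
--         "Summer: Breathable fabrics like linen and cotton. Light colors reflect heat and look fresh.",
--         "Fall: Earth tones and rich textures. Perfect time for layering and cozy knits.",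
--     ]
--     return advice[(month % 12) // 3]
-- ===== Notes on version B (the rewrite author's own statement) =====
-- stated objective: idiomatic
-- what changed: Replaced the dict-of-tuples membership scan with a range guard and a closed-form season index (month % 12) // 3 into a 4-element list.
import Mathlib
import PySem

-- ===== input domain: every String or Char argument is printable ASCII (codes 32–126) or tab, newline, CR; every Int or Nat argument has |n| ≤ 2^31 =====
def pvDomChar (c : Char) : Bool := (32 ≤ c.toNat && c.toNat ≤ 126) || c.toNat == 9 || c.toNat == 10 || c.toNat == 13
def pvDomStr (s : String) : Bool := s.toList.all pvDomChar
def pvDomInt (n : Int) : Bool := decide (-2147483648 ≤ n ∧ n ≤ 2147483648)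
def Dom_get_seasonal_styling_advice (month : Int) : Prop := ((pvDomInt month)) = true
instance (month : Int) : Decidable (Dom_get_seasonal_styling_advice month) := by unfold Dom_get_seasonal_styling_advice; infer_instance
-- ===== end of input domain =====

-- B replaces A's dict-of-tuples membership scan with a range guard and the closed-form index (month % 12) // 3 (idiomatic; same cost).

-- ===== PORT A =====
-- the dict of A, as an association list in insertion order
def pvSeasons : List (List Int × String) :=
  [ ([12, 1, 2], "Winter: Layer textures like wool, cashmere, and leather. Rich jewel tones and metallics shine now."),
    ([3, 4, 5], "Spring: Fresh pastels and florals bloom. Light layers and transitional pieces work perfectly."),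
    ([6, 7, 8], "Summer: Breathable fabrics like linen and cotton. Light colors reflect heat and look fresh."),
    ([9, 10, 11], "Fall: Earth tones and rich textures. Perfect time for layering and cozy knits.") ]

-- the for-loop with early return
def pvScan (month : Int) : List (List Int × String) → String
  | [] => ""
  | (months, advice) :: rest =>
      if month ∈ months then advice else pvScan month rest

def get_seasonal_styling_advice (month : Int) : String :=
  pvScan month pvSeasons

-- ===== PORT B =====
def pvAdvice : List String :=
  [ "Winter: Layer textures like wool, cashmere, and leather. Rich jewel tones and metallics shine now.",
    "Spring: Fresh pastels and florals bloom. Light layers and transitional pieces work perfectly.",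
    "Summer: Breathable fabrics like linen and cotton. Light colors reflect heat and look fresh.",
    "Fall: Earth tones and rich textures. Perfect time for layering and cozy knits." ]

def get_seasonal_styling_advice_alt (month : Int) : String :=
  if ¬ (1 ≤ month ∧ month ≤ 12) then ""
  else (PySem.List.pyGet? pvAdvice (PySem.Int.floordiv (PySem.Int.mod month 12) 3)).getD ""

-- ===== PRECONDITION & SPEC =====
def Spec_get_seasonal_styling_advice (month : Int) (out : String) : Prop := out = get_seasonal_styling_advice_alt month
instance (month : Int) (out : String) : Decidable (Spec_get_seasonal_styling_advice month out) := by unfold Spec_get_seasonal_styling_advice; infer_instance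

-- ===== CLAIM (what is proved, stated in full; the proofs are below) =====
def Claim_equal_get_seasonal_styling_advice : Prop := ∀ (month : Int), Dom_get_seasonal_styling_advice month → Spec_get_seasonal_styling_advice month (get_seasonal_styling_advice month)

-- ===== LEMMAS AND PROOFS =====

-- ===== VERDICT (by name: the statement is the Claim_ definition above) =====
theorem get_seasonal_styling_advice_spec : Claim_equal_get_seasonal_styling_advice := by
  intro month _
  unfold Spec_get_seasonal_styling_advice
  by_cases h : 1 ≤ month ∧ month ≤ 12
  · obtain ⟨h1, h2⟩ := h
    interval_cases month <;> decide
  · have h1 : month < 1 ∨ 12 < month := by omega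
    simp only [get_seasonal_styling_advice, get_seasonal_styling_advice_alt, if_pos h,
      pvSeasons, pvScan, List.mem_cons, List.not_mem_nil]
    rcases h1 with h1 | h1 <;> (rw [if_neg, if_neg, if_neg, if_neg] <;> simp <;> omega)
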